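-- pv_equiv track=rewrite | github.com/pypi-data/pypi-mirror-377 | packages/agentspec/agentspec-2.0.0.tar.gz/agentspec-2.0.0/agentspec/cli/interactive.py | _organize_tags_by_category
-- ===== SOURCE A (Python) =====
-- from typing import Any, Dict, List, Optional, Set, Tuple
--
-- def _organize_tags_by_category(tags: Set[str]) -> Dict[str, Set[str]]:
--     """Organize tags into categories"""
--     categories = {
--         "general": {
--             "general",
--             "quality",
--             "standards",
--             "persistence",
--             "tracking",
--         },
--         "testing": {
--             "testing",
--             "tdd",
--             "validation",
--             "automation",
--             "browser",
--         },
--         "frontend": {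
--             "frontend",
--             "ui",
--             "react",
--             "vue",
--             "angular",
--             "mobile",
--             "responsive",
--         },
--         "backend": {
--             "backend",
--             "api",
--             "database",
--             "security",
--             "performance",
--         },
--         "devops": {
--             "docker",
--             "ci-cd",
--             "deployment",
--             "monitoring",
--             "backup",
--         },
--         "languages": {"javascript", "typescript", "python", "type-safety"},
--         "architecture": {
--             "architecture",
--             "microservices",
--             "modularity",
--             "maintainability",
--         },
--     }
--
--     # Add tags to appropriate categories
--     result = {}
--     for category, category_tags in categories.items():
--         matching_tags = tags.intersection(category_tags)
--         if matching_tags: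
--             result[category] = matching_tags
--
--     # Add uncategorized tags
--     categorized_tags = set()
--     for category_tags in result.values():
--         categorized_tags.update(category_tags)
--
--     uncategorized = tags - categorized_tags
--     if uncategorized:
--         result["other"] = uncategorized
--
--     return result
-- ===== SOURCE B (Python) =====
-- CATEGORIES = {
--     "general": ("general", "quality", "standards", "persistence", "tracking"),
--     "testing": ("testing", "tdd", "validation", "automation", "browser"),
--     "frontend": ("frontend", "ui", "react", "vue", "angular", "mobile", "responsive"),
--     "backend": ("backend", "api", "database", "security", "performance"),
--     "devops": ("docker", "ci-cd", "deployment", "monitoring", "backup"),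
--     "languages": ("javascript", "typescript", "python", "type-safety"),
--     "architecture": ("architecture", "microservices", "modularity", "maintainability"),
-- }
--
-- _TAG_TO_CATEGORY = {t: c for c, members in CATEGORIES.items() for t in members}
--
--
-- def _organize_tags_by_category(tags):
--     """Organize tags into categories (single pass over an inverted index)."""
--     buckets = {}
--     for tag in tags:
--         buckets.setdefault(_TAG_TO_CATEGORY.get(tag, "other"), set()).add(tag)
--     return {c: buckets[c] for c in (*CATEGORIES, "other") if c in buckets}
-- ===== Notes on version B (the rewrite author's own statement) =====
-- stated objective: alternative
-- what changed: Replaces the seven per-category set intersections plus the separate categorized/uncategorized recomputation with a prebuilt inverted index (tag -> category) and a single tag-driven pass that buckets each tag, emitting buckets in the fixed category order.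
import Mathlib
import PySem

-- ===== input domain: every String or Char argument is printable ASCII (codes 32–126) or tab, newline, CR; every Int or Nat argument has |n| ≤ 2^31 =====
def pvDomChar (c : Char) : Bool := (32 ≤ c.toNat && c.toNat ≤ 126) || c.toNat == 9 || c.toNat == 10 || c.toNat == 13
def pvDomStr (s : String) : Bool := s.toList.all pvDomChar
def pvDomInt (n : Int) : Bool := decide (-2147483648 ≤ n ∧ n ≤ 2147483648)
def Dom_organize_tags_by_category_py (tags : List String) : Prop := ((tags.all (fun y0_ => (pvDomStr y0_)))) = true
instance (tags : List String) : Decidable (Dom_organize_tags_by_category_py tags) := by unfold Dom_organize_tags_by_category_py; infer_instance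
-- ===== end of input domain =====

set_option maxRecDepth 100000
set_option maxHeartbeats 2000000

-- B replaces A's seven per-category set intersections and the separate categorized/uncategorized
-- recomputation by an inverted index (tag -> category) and one bucketing pass over the tags.

-- the module-level categories table (shared constant data; set literals kept as ordered lists)
def pvCategories : List (String × List String) := [
  ("general", ["general", "quality", "standards", "persistence", "tracking"]),
  ("testing", ["testing", "tdd", "validation", "automation", "browser"]),
  ("frontend", ["frontend", "ui", "react", "vue", "angular", "mobile", "responsive"]),
  ("backend", ["backend", "api", "database", "security", "performance"]),
  ("devops", ["docker", "ci-cd", "deployment", "monitoring", "backup"]),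
  ("languages", ["javascript", "typescript", "python", "type-safety"]),
  ("architecture", ["architecture", "microservices", "modularity", "maintainability"])]

-- ===== PORT A =====
def organize_tags_by_category_py (tags : List String) : List (String × List String) :=
  -- for category, category_tags in categories.items(): if matching: result[category] = matching
  -- (all inserted keys are fresh and distinct, so the result dict is the appended assoc list)
  let result := pvCategories.foldl (fun r p =>
      let matching := PySem.Set.inter tags p.2
      if matching ≠ [] then r ++ [(p.1, matching)] else r) []
  let categorized := result.foldl (fun s p => PySem.Set.update s p.2) PySem.Set.empty
  let uncategorized := PySem.Set.diff tags categorized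
  if uncategorized ≠ [] then result ++ [("other", uncategorized)] else result

-- ===== PORT B =====
-- _TAG_TO_CATEGORY = {t: c for c, members in CATEGORIES.items() for t in members}
def pvTagIndex : PySem.Dict String String :=
  PySem.Dict.ofList (pvCategories.flatMap (fun p => p.2.map (fun t => (t, p.1))))

def organize_tags_by_category_py_alt (tags : List String) : List (String × List String) :=
  -- buckets.setdefault(index.get(tag, "other"), set()).add(tag)  ==  modify key set() (·.add tag)
  let buckets := tags.foldl (fun d t =>
      d.modify (pvTagIndex.getD t "other") PySem.Set.empty (fun s => PySem.Set.add s t))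
      PySem.Dict.empty
  -- {c: buckets[c] for c in (*CATEGORIES, "other") if c in buckets}
  (pvCategories.map (·.1) ++ ["other"]).filterMap
      (fun c => (buckets.get? c).map (fun s => (c, s)))

-- ===== PRECONDITION & SPEC =====
-- Pre_: tags is a Python set (parameter type Set[str]), modeled as a duplicate-free list;
-- on a non-set argument (a list with duplicates) A raises AttributeError (.intersection).
def Pre_organize_tags_by_category_py (tags : List String) : Prop := tags.Nodup
instance (tags : List String) : Decidable (Pre_organize_tags_by_category_py tags) := by unfold Pre_organize_tags_by_category_py; infer_instance
def pvWitness_organize_tags_by_category_py : List String := ["testing", "python", "my-tag"]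

def Spec_organize_tags_by_category_py (tags : List String) (out : List (String × List String)) : Prop := out = organize_tags_by_category_py_alt tags
instance (tags : List String) (out : List (String × List String)) : Decidable (Spec_organize_tags_by_category_py tags out) := by unfold Spec_organize_tags_by_category_py; infer_instance

-- ===== CLAIM (what is proved, stated in full; the proofs are below) =====
def Claim_equal_organize_tags_by_category_py : Prop := ∀ (tags : List String), Dom_organize_tags_by_category_py tags → Pre_organize_tags_by_category_py tags → Spec_organize_tags_by_category_py tags (organize_tags_by_category_py tags)

-- ===== LEMMAS AND PROOFS =====

-- the category B's index assigns to a tag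
def pvCatOf (t : String) : String := pvTagIndex.getD t "other"

-- index correctness: pvCatOf sends t to category c iff t is one of c's tags
lemma pvCatOf_eq_iff (c : String) (ct : List String) (h : (c, ct) ∈ pvCategories) (t : String) :
    (pvCatOf t = c) ↔ t ∈ ct := by
  fin_cases h <;>
  · simp only [pvCatOf, PySem.Dict.getD, PySem.Dict.get?,
      show pvTagIndex.items = (pvCategories.flatMap (fun p => p.2.map (fun t => (t, p.1)))) from rfl,
      pvCategories, List.flatMap, List.map, List.flatten, List.append]
    simp only [List.find?]
    repeat' split
    all_goals simp_all
    all_goals (first | (subst_vars; decide) | simp_all [eq_comm])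

lemma pvCatOf_other_iff (t : String) :
    (pvCatOf t = "other") ↔ ∀ p ∈ pvCategories, t ∉ p.2 := by
  simp only [pvCatOf, PySem.Dict.getD, PySem.Dict.get?,
    show pvTagIndex.items = (pvCategories.flatMap (fun p => p.2.map (fun t => (t, p.1)))) from rfl]
  simp only [pvCategories, List.flatMap, List.map, List.flatten, List.append,
    List.mem_cons, List.not_mem_nil, forall_eq_or_imp]
  simp only [List.find?]
  repeat' split
  all_goals simp_all
  all_goals (first | (subst_vars; decide) | simp_all [eq_comm])

-- bucket fold characterization
lemma pv_buckets_getD (l : List String) (d : PySem.Dict String (List String)) (c : String) :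
    (l.foldl (fun d t => d.modify (pvCatOf t) PySem.Set.empty
        (fun s => PySem.Set.add s t)) d).getD c PySem.Set.empty
      = PySem.Set.update (d.getD c PySem.Set.empty) (l.filter (fun t => pvCatOf t == c)) := by
  induction l generalizing d with
  | nil => simp [PySem.Set.update]
  | cons t l ih =>
    simp only [List.foldl_cons, List.filter_cons, ih]
    by_cases h : pvCatOf t = c
    · simp [h, PySem.Dict.getD_modify, PySem.Set.update_cons]
    · simp [h, PySem.Dict.getD_modify, Ne.symm h]

lemma pv_buckets_get? (tags : List String) (c : String) :
    ((tags.foldl (fun d t => d.modify (pvCatOf t) PySem.Set.empty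
        (fun s => PySem.Set.add s t)) PySem.Dict.empty).get? c)
      = if tags.filter (fun t => pvCatOf t == c) = [] then none
        else some (PySem.Set.ofList (tags.filter (fun t => pvCatOf t == c))) := by
  have hkeys := PySem.Dict.keys_foldl_modify_key (l := tags) (key := pvCatOf)
      (d0 := PySem.Set.empty) (f := fun _ t => (fun s => PySem.Set.add s t)) (d := PySem.Dict.empty)
  have hmem : c ∈ (tags.foldl (fun d t => d.modify (pvCatOf t) PySem.Set.empty
      (fun s => PySem.Set.add s t)) PySem.Dict.empty).keys
      ↔ ∃ t ∈ tags, pvCatOf t = c := by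
    rw [hkeys]
    simp only [PySem.Dict.keys_empty, PySem.Set.update_nil_left, PySem.Set.mem_ofList, List.mem_map]
  by_cases hf : tags.filter (fun t => pvCatOf t == c) = []
  · rw [if_pos hf, PySem.Dict.get?_eq_none_iff_not_mem_keys, hmem]
    rintro ⟨t, ht, hc⟩
    have hmf : t ∈ tags.filter (fun t => pvCatOf t == c) := by
      simp [List.mem_filter, ht, hc]
    rw [hf] at hmf
    exact absurd hmf (List.not_mem_nil)
  · rw [if_neg hf]
    have hc : c ∈ (tags.foldl (fun d t => d.modify (pvCatOf t) PySem.Set.empty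
        (fun s => PySem.Set.add s t)) PySem.Dict.empty).keys := by
      rw [hmem]
      rcases List.exists_mem_of_ne_nil _ hf with ⟨t, ht⟩
      rw [List.mem_filter] at ht
      exact ⟨t, ht.1, by simpa using ht.2⟩
    have hgd := pv_buckets_getD tags PySem.Dict.empty c
    rw [PySem.Dict.getD_eq_get?_getD] at hgd
    rcases ho : (tags.foldl (fun d t => d.modify (pvCatOf t) PySem.Set.empty
        (fun s => PySem.Set.add s t)) PySem.Dict.empty).get? c with _ | v
    · exfalso
      rw [PySem.Dict.get?_eq_none_iff_not_mem_keys] at ho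
      exact ho hc
    · rw [ho] at hgd
      simp only [Option.getD_some] at hgd
      rw [ho, hgd]
      simp [PySem.Dict.getD_empty, PySem.Set.update_nil_left]

-- generic shape of A's first loop
lemma pv_foldl_append_ite (l : List (String × List String)) (G : String × List String → List String)
    (acc : List (String × List String)) :
    l.foldl (fun r p => if G p ≠ [] then r ++ [(p.1, G p)] else r) acc
      = acc ++ l.filterMap (fun p => if G p = [] then none else some (p.1, G p)) := by
  induction l generalizing acc with
  | nil => simp
  | cons p l ih =>
    simp only [List.foldl_cons, List.filterMap_cons, ih]
    by_cases h : G p = [] <;> simp [h]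

lemma pv_mem_foldl_update (l : List (String × List String)) (s : List String) (y : String) :
    y ∈ l.foldl (fun s p => PySem.Set.update s p.2) s ↔ y ∈ s ∨ ∃ p ∈ l, y ∈ p.2 := by
  induction l generalizing s with
  | nil => simp
  | cons p l ih =>
    simp only [List.foldl_cons, ih, PySem.Set.mem_update, List.mem_cons]
    constructor
    · rintro (((h|h)|⟨q, hq, hy⟩))
      · exact Or.inl h
      · exact Or.inr ⟨p, Or.inl rfl, h⟩
      · exact Or.inr ⟨q, Or.inr hq, hy⟩
    · rintro (h|⟨q, (rfl|hq), hy⟩)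
      · exact Or.inl (Or.inl h)
      · exact Or.inl (Or.inr hy)
      · exact Or.inr ⟨q, hq, hy⟩

lemma pv_main (tags : List String) (hnd : tags.Nodup) :
    organize_tags_by_category_py tags = organize_tags_by_category_py_alt tags := by
  -- notation
  set F := fun c => tags.filter (fun t => pvCatOf t == c) with hF
  have hofList : ∀ c, PySem.Set.ofList (F c) = F c := fun c =>
    PySem.Set.ofList_eq_self_of_nodup _ (hnd.filter _)
  -- per-category: intersection = index-filter
  have hinter : ∀ p ∈ pvCategories, PySem.Set.inter tags p.2 = F p.1 := by
    intro p hp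
    simp only [PySem.Set.inter, hF]
    apply List.filter_congr
    intro t _
    have := pvCatOf_eq_iff p.1 p.2 hp t
    by_cases h : t ∈ p.2
    · simp [h, (this.mpr h)]
    · simp [h]
      intro hc
      exact h (this.mp hc)
  -- A's result list
  have hA1 : (pvCategories.foldl (fun r p =>
      let matching := PySem.Set.inter tags p.2
      if matching ≠ [] then r ++ [(p.1, matching)] else r) [])
      = pvCategories.filterMap (fun p => if F p.1 = [] then none else some (p.1, F p.1)) := by
    rw [show (fun (r : List (String × List String)) (p : String × List String) =>
        let matching := PySem.Set.inter tags p.2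
        if matching ≠ [] then r ++ [(p.1, matching)] else r)
      = (fun r p => if PySem.Set.inter tags p.2 ≠ [] then r ++ [(p.1, PySem.Set.inter tags p.2)] else r) from rfl]
    rw [pv_foldl_append_ite]
    simp only [List.nil_append]
    exact List.filterMap_congr (fun p hp => by rw [hinter p hp])
  set R := pvCategories.filterMap (fun p => if F p.1 = [] then none else some (p.1, F p.1)) with hR
  have hother_names : ∀ q ∈ pvCategories, q.1 ≠ "other" := by decide
  have hcat_mem : ∀ t ∈ tags, ((∃ p ∈ R, t ∈ p.2) ↔ ¬ (pvCatOf t = "other")) := by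
    intro t ht
    constructor
    · rintro ⟨p, hpR, ht2⟩
      rw [hR, List.mem_filterMap] at hpR
      rcases hpR with ⟨q, hq, hsome⟩
      by_cases hqe : F q.1 = []
      · rw [if_pos hqe] at hsome; exact absurd hsome (by simp)
      · rw [if_neg hqe] at hsome
        injection hsome with hpq
        subst hpq
        have : pvCatOf t = q.1 := by
          have := List.mem_filter.mp ht2
          simpa using this.2
        rw [this]
        exact hother_names q hq
    · intro hno
      rw [pvCatOf_other_iff] at hno
      push_neg at hno
      rcases hno with ⟨q, hq, ht2⟩
      have hcq : pvCatOf t = q.1 := (pvCatOf_eq_iff q.1 q.2 hq t).mpr ht2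
      have htF : t ∈ F q.1 := by
        simp [hF, List.mem_filter, ht, hcq]
      have hne : F q.1 ≠ [] := fun h => by rw [h] at htF; exact absurd htF (List.not_mem_nil)
      refine ⟨(q.1, F q.1), ?_, htF⟩
      rw [hR, List.mem_filterMap]
      exact ⟨q, hq, by rw [if_neg hne]⟩
  have hdiff : PySem.Set.diff tags (R.foldl (fun s p => PySem.Set.update s p.2) PySem.Set.empty)
      = F "other" := by
    simp only [PySem.Set.diff, hF]
    apply List.filter_congr
    intro t ht
    have hmu := pv_mem_foldl_update R PySem.Set.empty t
    have hcm := hcat_mem t ht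
    by_cases h : pvCatOf t = "other"
    · simp only [h]
      have : ¬ t ∈ R.foldl (fun s p => PySem.Set.update s p.2) PySem.Set.empty := by
        rw [hmu]
        simp only [PySem.Set.empty]
        rintro (hin | hex)
        · exact absurd hin (List.not_mem_nil)
        · exact (hcm.mp hex) h
      simp only [PySem.Set.empty] at this
      simp [this]
    · have : t ∈ R.foldl (fun s p => PySem.Set.update s p.2) PySem.Set.empty := by
        rw [hmu]
        exact Or.inr (hcm.mpr h)
      simp only [PySem.Set.empty] at this
      simp [this, h]
  -- unfold port A
  show (let result := pvCategories.foldl (fun r p =>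
      let matching := PySem.Set.inter tags p.2
      if matching ≠ [] then r ++ [(p.1, matching)] else r) []
    let categorized := result.foldl (fun s p => PySem.Set.update s p.2) PySem.Set.empty
    let uncategorized := PySem.Set.diff tags categorized
    if uncategorized ≠ [] then result ++ [("other", uncategorized)] else result)
    = organize_tags_by_category_py_alt tags
  simp only [hA1, hdiff]
  -- unfold port B
  show _ = (pvCategories.map (·.1) ++ ["other"]).filterMap
      (fun c => (((tags.foldl (fun d t =>
        d.modify (pvCatOf t) PySem.Set.empty (fun s => PySem.Set.add s t))
        PySem.Dict.empty).get? c)).map (fun s => (c, s)))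
  rw [List.filterMap_append, List.filterMap_map]
  have hBmain : pvCategories.filterMap ((fun c => (((tags.foldl (fun d t =>
        d.modify (pvCatOf t) PySem.Set.empty (fun s => PySem.Set.add s t))
        PySem.Dict.empty).get? c)).map (fun s => (c, s))) ∘ (·.1)) = R := by
    rw [hR]
    apply List.filterMap_congr
    intro p hp
    simp only [Function.comp, pv_buckets_get?]
    by_cases h : F p.1 = []
    · rw [hF] at h; simp [h, hF]
    · have h' := h; rw [hF] at h'
      simp only [hF] at h ⊢
      rw [if_neg h', if_neg h']
      simp only [Option.map_some]
      rw [show PySem.Set.ofList (List.filter (fun t => pvCatOf t == p.1) tags)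
          = List.filter (fun t => pvCatOf t == p.1) tags from hofList p.1]
  rw [hBmain]
  have hBother : List.filterMap (fun c => (((tags.foldl (fun d t =>
        d.modify (pvCatOf t) PySem.Set.empty (fun s => PySem.Set.add s t))
        PySem.Dict.empty).get? c)).map (fun s => (c, s))) ["other"]
      = if F "other" = [] then [] else [("other", F "other")] := by
    simp only [List.filterMap, pv_buckets_get?]
    by_cases h : F "other" = []
    · simp only [hF] at h; simp [h, hF]
    · have h' := h; rw [hF] at h'
      rw [if_neg h]
      simp only [hF] at h' ⊢
      simp [show PySem.Set.ofList (List.filter (fun t => pvCatOf t == "other") tags)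
          = List.filter (fun t => pvCatOf t == "other") tags from hofList "other"]
      rcases List.exists_mem_of_ne_nil _ h' with ⟨t, htm⟩
      rw [List.mem_filter] at htm
      exact ⟨t, htm.1, by simpa using htm.2⟩
  rw [hBother]
  by_cases h : F "other" = []
  · simp [h]
  · simp [h]

-- ===== VERDICT (by name: the statement is the Claim_ definition above) =====
theorem organize_tags_by_category_py_spec : Claim_equal_organize_tags_by_category_py := by
  intro tags _ hnd
  unfold Spec_organize_tags_by_category_py
  exact pv_main tags hnd
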